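-- pv_equiv track=rewrite | github.com/bgeun/Elice_Coding_Study | 11주차(2022.04.05~2022.04.11)/괄호 변환.py | solution
-- ===== SOURCE A (Python) =====
-- def sepUV(p):
--     left = 0
--     right = 0
--     for i in range(len(p)):
--         if p[i] == "(":
--             left += 1
--         elif p[i] == ")":
--             right += 1
--         if left == right:
--             return p[: i + 1], p[i + 1 :]
--
-- def check(u):
--     stack = []
--     for c in u:
--         if c == "(":
--             stack.append(c)
--         else:
--             if not len(stack):
--                 return False
--             elif stack[-1] == "(":
--                 stack.pop()
--     if len(stack):
--         return False
--     else:
--         return True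
--
-- def solution(p):
--     answer = ""
--     # 과정 1
--     if not p:
--         return ""
--     # 과정 2
--     u, v = sepUV(p)
--
--     # 과정 3
--     if check(u):
--         # 과정 3-1
--         return u + solution(v)
--
--     # 과정 4-1
--     answer += "("
--     # 과정 4-2
--     answer += solution(v)
--     # 과정 4-3
--     answer += ")"
--
--     u = u[1:-1]
--     # 과정 4-4
--     for c in u:
--         if c == "(":
--             answer += ")"
--         else:
--             answer += "("
--
--     return answer
-- ===== SOURCE B (Python) =====
-- def _nested(u):
--     n = 0
--     for c in u:
--         if c == "(":
--             n += 1
--         elif n == 0: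
--             return False
--         else:
--             n -= 1
--     return n == 0
--
-- def solution(p):
--     # single scan: cut a unit each time the running paren balance returns to 0
--     units = []
--     bal = 0
--     start = 0
--     for i, c in enumerate(p):
--         if c == "(":
--             bal += 1
--         elif c == ")":
--             bal -= 1
--         if bal == 0:
--             units.append(p[start:i + 1])
--             start = i + 1
--     if start != len(p):
--         raise ValueError("cannot split into balanced units")
--     res = ""
--     for u in reversed(units):
--         if _nested(u):
--             res = u + res
--         else:
--             res = "(" + res + ")" + "".join(")" if c == "(" else "(" for c in u[1:-1])
--     return res
-- ===== Notes on version B (the rewrite author's own statement) =====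
-- stated objective: alternative
-- what changed: Replaces A's recursive sepUV-suffix decomposition by a single balance scan that lists all minimal balanced units followed by a right-to-left fold over that list, and the stack-based nesting check by a counter.
-- outside the precondition, e.g. on solution('('): A raises TypeError, B raises ValueError; on solution(')'): A raises TypeError, B raises ValueError
import Mathlib
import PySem

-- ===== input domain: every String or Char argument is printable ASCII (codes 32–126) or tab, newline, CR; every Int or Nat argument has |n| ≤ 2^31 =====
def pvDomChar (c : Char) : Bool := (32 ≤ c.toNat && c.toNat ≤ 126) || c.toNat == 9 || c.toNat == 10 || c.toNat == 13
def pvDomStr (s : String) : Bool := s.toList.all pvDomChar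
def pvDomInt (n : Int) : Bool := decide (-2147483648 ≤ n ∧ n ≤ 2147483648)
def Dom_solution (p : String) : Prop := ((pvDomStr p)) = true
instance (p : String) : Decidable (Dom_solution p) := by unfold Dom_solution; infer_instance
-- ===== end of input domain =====

-- B replaces A's suffix recursion by one balance scan that lists the minimal balanced
-- units and a right-to-left fold over them (objective: alternative decomposition).
-- Both Pythons raise on strings whose '(' and ')' counts differ; Pre_ excludes those.

-- ===== PORT A =====

-- A's sepUV loop: left/right counters, return (p[:i+1], p[i+1:]) at the first i with left = right
def sepUVAux : List Char → Int → Int → List Char → Option (List Char × List Char)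
  | [], _, _, _ => none
  | c :: rest, left, right, acc =>
    let left := if c = '(' then left + 1 else left
    let right := if c = ')' ∧ ¬ (c = '(') then right + 1 else right
    if left = right then some (acc ++ [c], rest)
    else sepUVAux rest left right (acc ++ [c])

-- A's check loop with an explicit stack (head = Python stack[-1])
def checkAGo : List Char → List Char → Bool
  | [], st => if st.length ≠ 0 then false else true
  | c :: rest, st =>
    if c = '(' then checkAGo rest ('(' :: st)
    else match st with
      | [] => false
      | t :: st' => if t = '(' then checkAGo rest st' else checkAGo rest st

def checkA (u : List Char) : Bool := checkAGo u []

-- A's flipping loop in 과정 4-4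
def flipA : List Char → List Char
  | [] => []
  | c :: rest => (if c = '(' then ')' else '(') :: flipA rest

theorem sepUVAux_some_length :
    ∀ (s : List Char) (l r : Int) (acc u v : List Char),
      sepUVAux s l r acc = some (u, v) → v.length < s.length := by
  intro s
  induction s with
  | nil => intro l r acc u v h; simp [sepUVAux] at h
  | cons c rest ih =>
    intro l r acc u v h
    simp only [sepUVAux] at h
    by_cases hcut : (if c = '(' then l + 1 else l) = (if c = ')' ∧ ¬ (c = '(') then r + 1 else r)
    · rw [if_pos hcut] at h
      simp only [Option.some.injEq, Prod.mk.injEq] at h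
      rcases h with ⟨h1, h2⟩
      subst h2; simp
    · rw [if_neg hcut] at h
      exact Nat.lt_trans (ih _ _ _ _ _ h) (by simp)

-- solution, on List Char; the `none` branch is where Python raises TypeError (excluded by Pre_)
def solutionList (p : List Char) : List Char :=
  if p = [] then []
  else
    match h : sepUVAux p 0 0 [] with
    | none => []  -- Python A raises TypeError here (sepUV returned None); outside Pre_
    | some (u, v) =>
      if checkA u then u ++ solutionList v
      else '(' :: (solutionList v ++ ')' :: flipA ((u.drop 1).dropLast))
termination_by p.length
decreasing_by all_goals exact sepUVAux_some_length _ _ _ _ _ _ h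

def solution (p : String) : String := String.mk (solutionList p.toList)

-- ===== PORT B =====

-- B's single scan: running balance, cut a unit whenever it returns to 0;
-- returns (units, leftover after the last cut)
def splitUnitsAux : List Char → Int → List Char → List (List Char) × List Char
  | [], _, acc => ([], acc)
  | c :: rest, bal, acc =>
    let bal := if c = '(' then bal + 1 else if c = ')' then bal - 1 else bal
    let acc := acc ++ [c]
    if bal = 0 then
      let r := splitUnitsAux rest 0 []
      (acc :: r.1, r.2)
    else splitUnitsAux rest bal acc

-- B's _nested: counter instead of a stack
def nestedB : List Char → Nat → Bool
  | [], n => n == 0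
  | c :: rest, n =>
    if c = '(' then nestedB rest (n + 1)
    else if n = 0 then false
    else nestedB rest (n - 1)

-- B's flip comprehension
def flipB (u : List Char) : List Char := u.map (fun c => if c = '(' then ')' else '(')

def solution_alt (p : String) : String :=
  let r := splitUnitsAux p.toList 0 []
  if r.2 = [] then
    String.mk (r.1.reverse.foldl
      (fun res u =>
        if nestedB u 0 then u ++ res
        else '(' :: (res ++ ')' :: flipB ((u.drop 1).dropLast))) [])
  else ""  -- Python B raises ValueError here; outside Pre_

-- ===== PRECONDITION & SPEC =====
-- Pre_ excludes exactly the strings with unequal '(' / ')' counts, on which A raises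
-- TypeError (sepUV eventually returns None) and B raises ValueError.
def Pre_solution (p : String) : Prop := p.toList.count '(' = p.toList.count ')'
instance (p : String) : Decidable (Pre_solution p) := by unfold Pre_solution; infer_instance
def pvWitness_solution : String := "(a)()"

def Spec_solution (p : String) (out : String) : Prop := out = solution_alt p
instance (p : String) (out : String) : Decidable (Spec_solution p out) := by unfold Spec_solution; infer_instance

-- ===== CLAIM (what is proved, stated in full; the proofs are below) =====
def Claim_equal_solution : Prop := ∀ (p : String), Dom_solution p → Pre_solution p → Spec_solution p (solution p)

-- ===== LEMMAS AND PROOFS =====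

-- per-character balance contribution (proof-side helper)
def dC (c : Char) : Int := if c = '(' then 1 else if c = ')' then -1 else 0

theorem lr_d (c : Char) (l r : Int) :
    (if c = '(' then l + 1 else l) - (if c = ')' ∧ ¬ (c = '(') then r + 1 else r) = (l - r) + dC c := by
  by_cases h1 : c = '(' <;> by_cases h2 : c = ')' <;> simp [dC, h1, h2] <;> omega

theorem bal_d (c : Char) (bal : Int) :
    (if c = '(' then bal + 1 else if c = ')' then bal - 1 else bal) = bal + dC c := by
  by_cases h1 : c = '(' <;> by_cases h2 : c = ')' <;> simp [dC, h1, h2] <;> omega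


-- running balance of a string: + for '(', - for ')'
def balL : List Char → Int
  | [] => 0
  | c :: rest => dC c + balL rest

theorem balL_eq_counts (s : List Char) :
    balL s = (s.count '(' : Int) - (s.count ')' : Int) := by
  induction s with
  | nil => simp [balL]
  | cons c rest ih =>
    simp only [balL, List.count_cons, ih, dC]
    by_cases h1 : c = '(' <;> by_cases h2 : c = ')'
    · subst h1; simp at h2
    · simp [h1, h2]; push_cast; ring
    · simp [h1, h2]; push_cast; ring
    · simp [h1, h2]

-- the single fold step of B (foldr form)
def stepB (u res : List Char) : List Char :=
  if nestedB u 0 then u ++ res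
  else '(' :: (res ++ ')' :: flipB ((u.drop 1).dropLast))

theorem flipA_eq_flipB (s : List Char) : flipA s = flipB s := by
  induction s with
  | nil => simp [flipA, flipB]
  | cons c rest ih => simp [flipA, flipB, ih]

theorem checkAGo_eq_nestedB :
    ∀ (u st : List Char), (∀ c ∈ st, c = '(') → checkAGo u st = nestedB u st.length := by
  intro u
  induction u with
  | nil => intro st _; cases st <;> simp [checkAGo, nestedB]
  | cons c rest ih =>
    intro st hst
    by_cases hc : c = '('
    · subst hc
      simp only [checkAGo, nestedB, if_pos rfl]
      have hmem : ∀ x ∈ ('(' :: st), x = '(' := by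
        intro x hx
        rcases List.mem_cons.mp hx with h | h
        · exact h
        · exact hst x h
      rw [ih ('(' :: st) hmem]
      simp
    · simp only [checkAGo, nestedB, if_neg hc]
      cases st with
      | nil => simp
      | cons t st' =>
        have ht : t = '(' := hst t (List.mem_cons_self ..)
        simp only [ht, List.length_cons]
        have hmem : ∀ x ∈ st', x = '(' := fun x hx => hst x (List.mem_cons_of_mem _ hx)
        rw [ih st' hmem]
        simp

theorem checkA_eq_nestedB (u : List Char) : checkA u = nestedB u 0 := by
  simpa using checkAGo_eq_nestedB u [] (by simp)

-- link between A's sepUV and B's unit scan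
theorem sepUV_split :
    ∀ (s : List Char) (l r : Int) (acc : List Char),
      (∀ u v, sepUVAux s l r acc = some (u, v) →
        splitUnitsAux s (l - r) acc =
          (u :: (splitUnitsAux v 0 []).1, (splitUnitsAux v 0 []).2) ∧
        (l - r) + balL s = balL v) ∧
      (sepUVAux s l r acc = none → splitUnitsAux s (l - r) acc = ([], acc ++ s)) := by
  intro s
  induction s with
  | nil =>
    intro l r acc
    refine ⟨fun u v h => by simp [sepUVAux] at h, fun _ => by simp [splitUnitsAux]⟩
  | cons c rest ih =>
    intro l r acc
    have hsep : sepUVAux (c :: rest) l r acc =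
        (if (if c = '(' then l + 1 else l) = (if c = ')' ∧ ¬ (c = '(') then r + 1 else r)
          then some (acc ++ [c], rest)
          else sepUVAux rest (if c = '(' then l + 1 else l)
            (if c = ')' ∧ ¬ (c = '(') then r + 1 else r) (acc ++ [c])) := rfl
    have hspl : splitUnitsAux (c :: rest) (l - r) acc =
        (if (l - r) + dC c = 0
          then ((acc ++ [c]) :: (splitUnitsAux rest 0 []).1, (splitUnitsAux rest 0 []).2)
          else splitUnitsAux rest ((l - r) + dC c) (acc ++ [c])) := by
      show (let bal := if c = '(' then (l - r) + 1 else if c = ')' then (l - r) - 1 else (l - r);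
            let acc' := acc ++ [c];
            if bal = 0 then
              let rr := splitUnitsAux rest 0 []
              (acc' :: rr.1, rr.2)
            else splitUnitsAux rest bal acc') = _
      rw [bal_d]
    by_cases hcut : (if c = '(' then l + 1 else l) = (if c = ')' ∧ ¬ (c = '(') then r + 1 else r)
    · have hz : (l - r) + dC c = 0 := by have := lr_d c l r; omega
      constructor
      · intro u v h
        rw [hsep, if_pos hcut] at h
        simp only [Option.some.injEq, Prod.mk.injEq] at h
        rcases h with ⟨h1, h2⟩
        subst h1; subst h2
        refine ⟨by rw [hspl, if_pos hz], ?_⟩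
        simp only [balL]; omega
      · intro h
        rw [hsep, if_pos hcut] at h
        simp at h
    · have hz : ¬ ((l - r) + dC c = 0) := by have := lr_d c l r; omega
      have ihr := ih (if c = '(' then l + 1 else l) (if c = ')' ∧ ¬ (c = '(') then r + 1 else r) (acc ++ [c])
      have hd : (if c = '(' then l + 1 else l) - (if c = ')' ∧ ¬ (c = '(') then r + 1 else r)
          = (l - r) + dC c := lr_d c l r
      constructor
      · intro u v h
        rw [hsep, if_neg hcut] at h
        have := ihr.1 u v h
        rw [hd] at this
        refine ⟨by rw [hspl, if_neg hz]; exact this.1, ?_⟩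
        have h2 := this.2
        simp only [balL]; omega
      · intro h
        rw [hsep, if_neg hcut] at h
        have := ihr.2 h
        rw [hd] at this
        rw [hspl, if_neg hz, this]
        simp

-- leftover of the unit scan is empty on balance-0 input
theorem split_snd_nil :
    ∀ (s : List Char) (bal : Int) (acc : List Char),
      bal + balL s = 0 → (s = [] → acc = []) → (splitUnitsAux s bal acc).2 = [] := by
  intro s
  induction s with
  | nil => intro bal acc _ h2; simp [splitUnitsAux, h2 rfl]
  | cons c rest ih =>
    intro bal acc h1 _
    have hspl : splitUnitsAux (c :: rest) bal acc =
        (if bal + dC c = 0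
          then ((acc ++ [c]) :: (splitUnitsAux rest 0 []).1, (splitUnitsAux rest 0 []).2)
          else splitUnitsAux rest (bal + dC c) (acc ++ [c])) := by
      show (let bal' := if c = '(' then bal + 1 else if c = ')' then bal - 1 else bal;
            let acc' := acc ++ [c];
            if bal' = 0 then
              let rr := splitUnitsAux rest 0 []
              (acc' :: rr.1, rr.2)
            else splitUnitsAux rest bal' acc') = _
      rw [bal_d]
    have hsum : (bal + dC c) + balL rest = 0 := by simp only [balL] at h1; omega
    rw [hspl]
    by_cases hz : bal + dC c = 0
    · rw [if_pos hz]
      exact ih 0 [] (by omega) (fun _ => rfl)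
    · rw [if_neg hz]
      exact ih _ _ hsum (by intro hr; rw [hr] at hsum; simp [balL] at hsum; omega)

-- Main lemma: A's recursion equals the right fold of B over the units, on balance-0 input
theorem main_lemma :
    ∀ (n : Nat) (p : List Char), p.length ≤ n → balL p = 0 →
      solutionList p = List.foldr stepB [] (splitUnitsAux p 0 []).1 := by
  intro n
  induction n with
  | zero =>
    intro p hlen _
    have : p = [] := by cases p <;> simp_all
    subst this; simp [solutionList, splitUnitsAux]
  | succ n ih =>
    intro p hlen hbal
    match p with
    | [] => simp [solutionList, splitUnitsAux]
    | c :: rest =>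
      rw [solutionList]
      cases h : sepUVAux (c :: rest) 0 0 [] with
      | none =>
        exfalso
        have := (sepUV_split (c :: rest) 0 0 []).2 h
        have h2 := split_snd_nil (c :: rest) 0 [] (by omega) (by intro h; cases h)
        rw [show (0 : Int) - 0 = 0 by omega] at this
        rw [this] at h2
        simp at h2
      | some uv =>
        obtain ⟨u, v⟩ := uv
        have hlink := (sepUV_split (c :: rest) 0 0 []).1 u v h
        rw [show (0 : Int) - 0 = 0 by omega] at hlink
        have hv : balL v = 0 := by omega
        have hvlen : v.length < (c :: rest).length := sepUVAux_some_length _ _ _ _ _ _ h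
        have hrec := ih v (by simp only [List.length_cons] at hvlen hlen ⊢; omega) hv
        rw [hlink.1]
        simp only [List.foldr_cons, stepB, checkA_eq_nestedB, flipA_eq_flipB, hrec]
        simp

-- ===== VERDICT (by name: the statement is the Claim_ definition above) =====
theorem solution_spec : Claim_equal_solution := by
  intro p _ hpre
  unfold Spec_solution solution solution_alt
  have hbal : balL p.toList = 0 := by
    rw [balL_eq_counts]
    unfold Pre_solution at hpre
    omega
  have hlo : (splitUnitsAux p.toList 0 []).2 = [] := by
    apply split_snd_nil _ _ _ (by omega)
    intro h; rfl
  simp only [hlo, if_pos rfl]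
  rw [main_lemma p.toList.length p.toList le_rfl hbal]
  congr 1
  rw [List.foldl_reverse]
  rfl
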